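-- pv_equiv track=rewrite | github.com/amchiclet/compiler-evaluation-experiments | sampler.py | find_iteration_attributes
-- ===== SOURCE A (Python) =====
-- def find_iteration_attributes(n):
--     # Requirement 1: GCD(offset, period) must be 1
--
--     # First, find the smallest 2^x that's greater than n
--     # We are doing this because the only prime factor of m would be 2
--     # When the only prime factor is 2, it's easy to find other attributes
--     period = 1
--     while period < n:
--         period *= 2
--
--     # Since period is an even number,
--     # any odd number would satisfy requirement 1
--     offset = period // 2
--     if offset % 2 == 0:
--         offset += 1
--
--     # Requirement 2:
--     # Let b = coeff - 1
--     # b must be a multiple of every prime factors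
--     # The only prime factor is 2, so any even number works
--     # let's just use 4
--     b = 4
--
--     # Requirement 3: if m is a multiple of 4, then b must be too
--     # b is already 4, so nothing to do here
--     coeff = b + 1
--     return coeff, offset, period
-- ===== SOURCE B (Python) =====
-- def find_iteration_attributes(n):
--     # Closed-form smallest power of two >= n via bit_length (no loop).
--     period = 1 if n <= 1 else 1 << (n - 1).bit_length()
--     offset = period // 2
--     if offset % 2 == 0:
--         offset += 1
--     coeff = 5
--     return coeff, offset, period
-- ===== Notes on version B (the rewrite author's own statement) =====
-- stated objective: idiomatic
-- what changed: Replaces the iterative doubling while-loop with a closed-form power of two computed from (n-1).bit_length().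
import Mathlib
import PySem

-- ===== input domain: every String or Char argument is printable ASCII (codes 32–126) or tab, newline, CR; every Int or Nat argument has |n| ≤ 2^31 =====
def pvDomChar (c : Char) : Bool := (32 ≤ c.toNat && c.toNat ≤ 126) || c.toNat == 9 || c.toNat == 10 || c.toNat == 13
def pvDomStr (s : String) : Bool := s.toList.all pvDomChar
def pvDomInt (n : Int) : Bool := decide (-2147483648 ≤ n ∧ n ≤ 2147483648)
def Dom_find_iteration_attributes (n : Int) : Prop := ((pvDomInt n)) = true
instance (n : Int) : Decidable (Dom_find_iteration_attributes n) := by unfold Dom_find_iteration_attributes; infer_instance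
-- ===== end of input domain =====

-- B replaces A's doubling while-loop by a closed-form power of two from bit_length; return value proved equal for all n.

-- ===== PORT A =====
-- the while-loop `while period < n: period *= 2`, entered with period = 1 > 0
def growPeriod (n p : Int) (hp : 0 < p) : Int :=
  if h : p < n then growPeriod n (2 * p) (by omega) else p
termination_by (n - p).toNat
decreasing_by omega

def find_iteration_attributes (n : Int) : Int × Int × Int :=
  let period := growPeriod n 1 (by omega)
  let offset := PySem.Int.floordiv period 2
  let offset := if PySem.Int.mod offset 2 = 0 then offset + 1 else offset
  let b : Int := 4
  let coeff := b + 1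
  (coeff, offset, period)

-- ===== PORT B =====
def find_iteration_attributes_alt (n : Int) : Int × Int × Int :=
  -- (n-1).bit_length() on a nonnegative int is Nat.size
  let period : Int := if n ≤ 1 then 1 else 2 ^ Nat.size (n - 1).toNat
  let offset := PySem.Int.floordiv period 2
  let offset := if PySem.Int.mod offset 2 = 0 then offset + 1 else offset
  let coeff : Int := 5
  (coeff, offset, period)

-- ===== PRECONDITION & SPEC =====
def Spec_find_iteration_attributes (n : Int) (out : Int × Int × Int) : Prop := out = find_iteration_attributes_alt n
instance (n : Int) (out : Int × Int × Int) : Decidable (Spec_find_iteration_attributes n out) := by unfold Spec_find_iteration_attributes; infer_instance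

-- ===== CLAIM (what is proved, stated in full; the proofs are below) =====
def Claim_equal_find_iteration_attributes : Prop := ∀ (n : Int), Dom_find_iteration_attributes n → Spec_find_iteration_attributes n (find_iteration_attributes n)

-- ===== LEMMAS AND PROOFS =====

theorem growPeriod_congr (n p q : Int) (hp : 0 < p) (hq : 0 < q) (h : p = q) :
    growPeriod n p hp = growPeriod n q hq := by subst h; rfl

theorem growPeriod_stop (n p : Int) (hp : 0 < p) (h : ¬ p < n) : growPeriod n p hp = p := by
  rw [growPeriod]; simp [h]

theorem growPeriod_step (n p : Int) (hp : 0 < p) (h : p < n) :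
    growPeriod n p hp = growPeriod n (2 * p) (by omega) := by
  rw [growPeriod]; simp [h]

-- climbing from 2^k to 2^L where L = Nat.size (n-1).toNat, for n ≥ 2
theorem growPeriod_pow (n : Int) (hn : 2 ≤ n) :
    ∀ (d k : ℕ), k + d = Nat.size (n - 1).toNat →
      growPeriod n ((2 : Int) ^ k) (by positivity) = 2 ^ Nat.size (n - 1).toNat := by
  intro d
  induction d with
  | zero =>
    intro k hk
    have hk' : k = Nat.size (n - 1).toNat := by omega
    subst hk'
    have h1 : (n - 1).toNat < 2 ^ Nat.size (n - 1).toNat := Nat.lt_size_self _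
    have h2 : n - 1 ≤ ((n - 1).toNat : Int) := by omega
    have : ¬ ((2 : Int) ^ Nat.size (n - 1).toNat < n) := by
      have := (Nat.cast_lt (α := Int)).mpr h1
      push_cast at this ⊢
      omega
    exact growPeriod_stop _ _ _ this
  | succ d ih =>
    intro k hk
    have hkL : k < Nat.size (n - 1).toNat := by omega
    have h2 : (2 : ℕ) ^ k ≤ (n - 1).toNat := Nat.lt_size.mp hkL
    have h2' : ((2 : Int) ^ k) < n := by
      have := (Nat.cast_le (α := Int)).mpr h2
      push_cast at this
      omega
    rw [growPeriod_step n _ _ h2',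
        growPeriod_congr n _ ((2 : Int) ^ (k + 1)) _ (by positivity) (by ring)]
    exact ih (k + 1) (by omega)

theorem growPeriod_closed (n : Int) :
    growPeriod n 1 (by omega) = if n ≤ 1 then 1 else 2 ^ Nat.size (n - 1).toNat := by
  by_cases h : n ≤ 1
  · rw [growPeriod_stop n 1 (by omega) (by omega)]
    simp [h]
  · have hn : 2 ≤ n := by omega
    simp only [h, if_false]
    have := growPeriod_pow n hn (Nat.size (n - 1).toNat) 0 (by omega)
    simpa using this

-- ===== VERDICT (by name: the statement is the Claim_ definition above) =====
theorem find_iteration_attributes_spec : Claim_equal_find_iteration_attributes := by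
  intro n _
  unfold Spec_find_iteration_attributes find_iteration_attributes find_iteration_attributes_alt
  rw [growPeriod_closed]
  norm_num
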